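-- pv_equiv track=rewrite | github.com/PCGML-Book/WaveFunctionCollapse-Level-Generation | WFC_train.py | compute_adjacencies
-- ===== SOURCE A (Python) =====
-- def pattern_to_tuple(pattern):
-- 	flattened_pattern = [tile for row in pattern for tile in row]
-- 	pattern_as_tuple = tuple(flattened_pattern)
--
-- 	return pattern_as_tuple
--
-- def compute_adjacencies(observed_patterns, row_offset=1, col_offset=1):
-- 	adjacencies = {}
--
-- 	for pattern_1 in observed_patterns:
-- 		pattern_key = pattern_to_tuple(pattern_1)
-- 		adjacencies[pattern_key] = {"above":[], "below":[],
-- 									"left":[], "right":[]}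
-- 		for pattern_2 in observed_patterns:
-- 			pattern_value = pattern_to_tuple(pattern_2)
-- 			# if pattern_key == str(pattern_value):
-- 			# 	continue
-- 			# check for allowed relative placements
-- 			allowed_adjacencies = compute_adjacency_for_pattern_pair(pattern_1,
-- 																	pattern_2,
-- 																	row_offset,
-- 																	col_offset)
-- 			for direction in allowed_adjacencies:
-- 				adjacencies[pattern_key][direction].append(pattern_value)
--
-- 	return adjacencies
--
-- def compute_adjacency_for_pattern_pair(p_1, p_2, row_offset, col_offset):
--
-- 	height = len(p_1)
-- 	width = len(p_1[0])
--
-- 	p_1_top, p_1_bottom, p_1_left, p_1_right = get_pattern_slices(p_1,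
-- 																row_offset,
-- 																col_offset)
--
-- 	p_2_top, p_2_bottom, p_2_left, p_2_right = get_pattern_slices(p_2,
-- 																row_offset,
-- 																col_offset)
--
--
-- 	allowed_adjacency_directions = []
-- 	# check p_1
-- 	#		 |
-- 	#		 v
-- 	#		p_2
-- 	if p_1_bottom == p_2_top:
-- 		allowed_adjacency_directions.append("below")
--
-- 	# check p_2
-- 	#		 ^
-- 	#		 |
-- 	#		p_1
-- 	if p_1_top == p_2_bottom:
-- 		allowed_adjacency_directions.append("above")
--
-- 	# check p_1 -> p_2
-- 	if p_1_right == p_2_left: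
-- 		allowed_adjacency_directions.append("right")
--
--
-- 	# check p_2 <- p_1
-- 	if p_1_left == p_2_right:
-- 		allowed_adjacency_directions.append("left")
--
-- 	return allowed_adjacency_directions
--
-- def get_pattern_slices(pattern, row_offset, col_offset):
-- 	height = len(pattern)
-- 	width = len(pattern[0])
--
-- 	p_top, p_bottom = ([[None for c in range(width)]
-- 										for r in range(height-row_offset)]
-- 															for i in range(2))
-- 	p_left, p_right = ([[None for c in range(width-col_offset)]
-- 										for r in range(height)]
-- 															for i in range(2))
--
--
-- 	for row_index in range(height):
-- 		for col_index in range(width):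
-- 			if row_index < height - row_offset:
-- 				p_top[row_index][col_index] = pattern[row_index][col_index]
--
-- 			if row_index >= row_offset:
-- 				p_bottom[row_index-row_offset][col_index] = \
-- 												pattern[row_index][col_index]
--
-- 			if col_index < width - col_offset:
-- 				p_left[row_index][col_index] = pattern[row_index][col_index]
--
-- 			if col_index >= col_offset:
-- 				p_right[row_index][col_index-col_offset] = \
-- 												pattern[row_index][col_index]
--
-- 	return p_top, p_bottom, p_left, p_right
-- ===== SOURCE B (Python) =====
-- def compute_adjacencies(observed_patterns, row_offset=1, col_offset=1):
-- 	infos = []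
-- 	for p in observed_patterns:
-- 		key = tuple(tile for row in p for tile in row)
-- 		h = len(p)
-- 		w = len(p[0])
-- 		top = tuple(tuple(row[:w]) for row in p[:max(0, h - row_offset)])
-- 		bottom = tuple(tuple(row[:w]) for row in p[row_offset:h])
-- 		left = tuple(tuple(row[:max(0, w - col_offset)]) for row in p)
-- 		right = tuple(tuple(row[col_offset:w]) for row in p)
-- 		infos.append((key, top, bottom, left, right))
--
-- 	top_idx, bottom_idx, left_idx, right_idx = {}, {}, {}, {}
-- 	for key, t, b, l, r in infos:
-- 		top_idx.setdefault(t, []).append(key)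
-- 		bottom_idx.setdefault(b, []).append(key)
-- 		left_idx.setdefault(l, []).append(key)
-- 		right_idx.setdefault(r, []).append(key)
--
-- 	adjacencies = {}
-- 	for key, t, b, l, r in infos:
-- 		adjacencies[key] = {"above": list(bottom_idx.get(t, [])),
-- 							"below": list(top_idx.get(b, [])),
-- 							"left": list(right_idx.get(l, [])),
-- 							"right": list(left_idx.get(r, []))}
-- 	return adjacencies
-- ===== Notes on version B (the rewrite author's own statement) =====
-- stated objective: faster
-- what changed: Instead of comparing every pair of patterns slice-by-slice, B computes each pattern's four overlap slices once, builds hash indexes from each slice to the patterns carrying it in one pass, and fills each pattern's four direction lists by a single index lookup.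
import Mathlib
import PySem

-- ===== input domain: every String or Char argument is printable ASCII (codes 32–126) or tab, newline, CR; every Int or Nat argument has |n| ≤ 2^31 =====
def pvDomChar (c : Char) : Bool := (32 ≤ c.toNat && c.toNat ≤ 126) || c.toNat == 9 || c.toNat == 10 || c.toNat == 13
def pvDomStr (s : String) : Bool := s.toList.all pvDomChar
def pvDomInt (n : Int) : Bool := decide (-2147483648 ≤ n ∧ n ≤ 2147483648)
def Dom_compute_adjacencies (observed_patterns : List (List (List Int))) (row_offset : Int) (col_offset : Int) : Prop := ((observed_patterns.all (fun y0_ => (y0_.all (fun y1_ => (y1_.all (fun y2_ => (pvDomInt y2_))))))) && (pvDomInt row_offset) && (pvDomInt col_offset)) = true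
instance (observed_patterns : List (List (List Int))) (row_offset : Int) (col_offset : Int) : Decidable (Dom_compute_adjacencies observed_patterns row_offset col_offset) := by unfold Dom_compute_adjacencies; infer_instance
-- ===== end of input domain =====

-- ===== PORT A =====
-- B is an exact re-implementation of A; a timing run measures whether the hash-index
-- strategy is faster. Header: B replaces the all-pairs slice comparison by slice-keyed
-- hash indexes built in one pass (objective: faster).

-- [tile for row in pattern for tile in row]
def pattern_to_tuple (pattern : List (List Int)) : List Int :=
  pattern.flatMap (fun row => row)

-- g[r][c] = v  (Python in-place cell assignment; PySem.pySetD/pyGetD carry Python's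
-- index semantics; exact wherever the Python assignment succeeds)
def pvSetCell (g : List (List (Option Int))) (r c : Int) (v : Option Int) :
    List (List (Option Int)) :=
  PySem.List.pySetD g r (PySem.List.pySetD (PySem.List.pyGetD g r []) c v)

def get_pattern_slices (pattern : List (List Int)) (row_offset col_offset : Int) :
    List (List (Option Int)) × List (List (Option Int)) ×
    List (List (Option Int)) × List (List (Option Int)) :=
  let height : Int := PySem.List.len pattern
  -- len(pattern[0]): IndexError on an empty pattern, excluded by Pre_
  let width : Int := PySem.List.len (PySem.List.pyGetD pattern 0 [])
  let p_top : List (List (Option Int)) :=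
    (PySem.List.pyRange 0 (height - row_offset)).map
      (fun _ => (PySem.List.pyRange 0 width).map (fun _ => (none : Option Int)))
  let p_bottom : List (List (Option Int)) :=
    (PySem.List.pyRange 0 (height - row_offset)).map
      (fun _ => (PySem.List.pyRange 0 width).map (fun _ => (none : Option Int)))
  let p_left : List (List (Option Int)) :=
    (PySem.List.pyRange 0 height).map
      (fun _ => (PySem.List.pyRange 0 (width - col_offset)).map (fun _ => (none : Option Int)))
  let p_right : List (List (Option Int)) :=
    (PySem.List.pyRange 0 height).map
      (fun _ => (PySem.List.pyRange 0 (width - col_offset)).map (fun _ => (none : Option Int)))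
  (PySem.List.pyRange 0 height).foldl (fun st row_index =>
    (PySem.List.pyRange 0 width).foldl (fun st col_index =>
      -- pattern[row_index][col_index]; in range under Pre_
      let v : Option Int :=
        some (PySem.List.pyGetD (PySem.List.pyGetD pattern row_index []) col_index 0)
      ( if row_index < height - row_offset then pvSetCell st.1 row_index col_index v else st.1,
        if row_offset ≤ row_index then
          pvSetCell st.2.1 (row_index - row_offset) col_index v else st.2.1,
        if col_index < width - col_offset then pvSetCell st.2.2.1 row_index col_index v
          else st.2.2.1,
        if col_offset ≤ col_index then
          pvSetCell st.2.2.2 row_index (col_index - col_offset) v else st.2.2.2 )) st)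
    (p_top, p_bottom, p_left, p_right)

def compute_adjacency_for_pattern_pair (p_1 p_2 : List (List Int))
    (row_offset col_offset : Int) : List String :=
  let s1 := get_pattern_slices p_1 row_offset col_offset
  let s2 := get_pattern_slices p_2 row_offset col_offset
  let dirs : List String := []
  let dirs := if s1.2.1 = s2.1 then dirs ++ ["below"] else dirs
  let dirs := if s1.1 = s2.2.1 then dirs ++ ["above"] else dirs
  let dirs := if s1.2.2.2 = s2.2.2.1 then dirs ++ ["right"] else dirs
  let dirs := if s1.2.2.1 = s2.2.2.2 then dirs ++ ["left"] else dirs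
  dirs

def compute_adjacencies (observed_patterns : List (List (List Int))) (row_offset : Int) (col_offset : Int) : List (List Int × List (String × List (List Int))) :=
  let adjacencies : PySem.Dict (List Int) (PySem.Dict String (List (List Int))) :=
    observed_patterns.foldl (fun adjacencies pattern_1 =>
      let pattern_key := pattern_to_tuple pattern_1
      let adjacencies := adjacencies.insert pattern_key
        (PySem.Dict.ofList [("above", ([] : List (List Int))), ("below", []),
                            ("left", []), ("right", [])])
      observed_patterns.foldl (fun adjacencies pattern_2 =>
        let pattern_value := pattern_to_tuple pattern_2
        let allowed := compute_adjacency_for_pattern_pair pattern_1 pattern_2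
                         row_offset col_offset
        -- adjacencies[pattern_key][direction].append(pattern_value)
        allowed.foldl (fun adjacencies direction =>
          adjacencies.modify pattern_key PySem.Dict.empty
            (fun inner => inner.modify direction [] (fun l => l ++ [pattern_value])))
          adjacencies) adjacencies) PySem.Dict.empty
  adjacencies.items.map (fun p => (p.1, p.2.items))

-- ===== PORT B =====

-- the four overlap slices of a pattern, by list slicing
def pvSlices (p : List (List Int)) (row_offset col_offset : Int) :
    List (List Int) × List (List Int) × List (List Int) × List (List Int) :=
  let h : Int := PySem.List.len p
  -- len(p[0]): IndexError on an empty pattern, excluded by Pre_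
  let w : Int := PySem.List.len (PySem.List.pyGetD p 0 [])
  let top := (PySem.List.slice p none (some (max 0 (h - row_offset)))).map
      (fun row => PySem.List.slice row none (some w))
  let bottom := (PySem.List.slice p (some row_offset) (some h)).map
      (fun row => PySem.List.slice row none (some w))
  let left := p.map (fun row => PySem.List.slice row none (some (max 0 (w - col_offset))))
  let right := p.map (fun row => PySem.List.slice row (some col_offset) (some w))
  (top, bottom, left, right)

def compute_adjacencies_alt (observed_patterns : List (List (List Int))) (row_offset : Int) (col_offset : Int) : List (List Int × List (String × List (List Int))) :=
  let infos := observed_patterns.map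
    (fun p => (p.flatMap (fun row => row), pvSlices p row_offset col_offset))
  -- one pass: index each slice kind by its value
  let idx := infos.foldl
    (fun (st : PySem.Dict (List (List Int)) (List (List Int)) ×
               PySem.Dict (List (List Int)) (List (List Int)) ×
               PySem.Dict (List (List Int)) (List (List Int)) ×
               PySem.Dict (List (List Int)) (List (List Int))) q =>
      ( st.1.modify q.2.1 [] (fun l => l ++ [q.1]),
        st.2.1.modify q.2.2.1 [] (fun l => l ++ [q.1]),
        st.2.2.1.modify q.2.2.2.1 [] (fun l => l ++ [q.1]),
        st.2.2.2.modify q.2.2.2.2 [] (fun l => l ++ [q.1]) ))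
    (PySem.Dict.empty, PySem.Dict.empty, PySem.Dict.empty, PySem.Dict.empty)
  -- one lookup per pattern and direction
  let out : PySem.Dict (List Int) (PySem.Dict String (List (List Int))) :=
    infos.foldl (fun out q =>
      out.insert q.1
        (PySem.Dict.ofList
          [("above", idx.2.1.getD q.2.1 []),
           ("below", idx.1.getD q.2.2.1 []),
           ("left", idx.2.2.2.getD q.2.2.2.1 []),
           ("right", idx.2.2.1.getD q.2.2.2.2 [])])) PySem.Dict.empty
  out.items.map (fun p => (p.1, p.2.items))

-- ===== PRECONDITION & SPEC =====
-- Pre_ excludes (a) inputs with an empty pattern or a pattern row shorter than the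
-- pattern's first row (unless the offsets are at least the pattern's size, so that no
-- cell is read), on which A generally raises IndexError, and (b) negative offsets,
-- outside the natural domain of the function, where A's grids keep leftover None
-- padding from its initialisation.
def Pre_compute_adjacencies (observed_patterns : List (List (List Int))) (row_offset : Int) (col_offset : Int) : Prop :=
  0 ≤ row_offset ∧ 0 ≤ col_offset ∧
  ∀ p ∈ observed_patterns, p ≠ [] ∧
    ((∀ row ∈ p, p.headI.length ≤ row.length) ∨
      ((p.length : Int) ≤ row_offset ∧ (p.headI.length : Int) ≤ col_offset))
instance (observed_patterns : List (List (List Int))) (row_offset : Int) (col_offset : Int) : Decidable (Pre_compute_adjacencies observed_patterns row_offset col_offset) := by unfold Pre_compute_adjacencies; infer_instance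

def pvWitness_compute_adjacencies : List (List (List Int)) × Int × Int :=
  ([[[1, 2], [3, 4]], [[3, 4], [5, 6]]], 1, 1)

def Spec_compute_adjacencies (observed_patterns : List (List (List Int))) (row_offset : Int) (col_offset : Int) (out : List (List Int × List (String × List (List Int)))) : Prop := out = compute_adjacencies_alt observed_patterns row_offset col_offset
instance (observed_patterns : List (List (List Int))) (row_offset : Int) (col_offset : Int) (out : List (List Int × List (String × List (List Int)))) : Decidable (Spec_compute_adjacencies observed_patterns row_offset col_offset out) := by unfold Spec_compute_adjacencies; infer_instance

-- ===== CLAIM (what is proved, stated in full; the proofs are below) =====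
def Claim_equal_compute_adjacencies : Prop := ∀ (observed_patterns : List (List (List Int))) (row_offset : Int) (col_offset : Int), Dom_compute_adjacencies observed_patterns row_offset col_offset → Pre_compute_adjacencies observed_patterns row_offset col_offset → Spec_compute_adjacencies observed_patterns row_offset col_offset (compute_adjacencies observed_patterns row_offset col_offset)

-- ===== LEMMAS AND PROOFS =====


lemma pvPyGetD_nonneg {α : Type} (xs : List α) (i : Int) (d : α) (h : 0 ≤ i) :
    PySem.List.pyGetD xs i d = xs.getD i.toNat d := by
  simp [PySem.List.pyGetD, PySem.List.pyGet?, PySem.List.pyIdx?, h]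
  split_ifs with h2
  · simp [List.getD_eq_getElem?_getD]
  · simp [List.getElem?_eq_none_iff.mpr (by omega : xs.length ≤ i.toNat),
      List.getD_eq_getElem?_getD]

lemma pvMapGetDRange {α : Type} (g : List α) (d : α) :
    (List.range g.length).map (fun j => g.getD j d) = g := by
  apply List.ext_getElem (by simp)
  intro j h1 h2
  simp [List.getD_eq_getElem?_getD, List.getElem?_eq_getElem h2]

lemma pvWindowFill {α : Type} (b lo hi : Int) (F : Int → α → α) (d : α) (g0 : List α)
    (hb0 : 0 ≤ b) (hlo : 0 ≤ lo) (hhib : hi ≤ b) :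
    (PySem.List.pyRange 0 b).foldl
      (fun g i => if lo ≤ i ∧ i < hi then
          PySem.List.pySetD g (i - lo) (F i (PySem.List.pyGetD g (i - lo) d)) else g) g0
    = (List.range g0.length).map
        (fun (j : Nat) => if (j : Int) < hi - lo then F (lo + j) (g0.getD j d) else g0.getD j d) := by
  have aux : ∀ (k : Int) (hk : 0 ≤ k), k ≤ b →
      (PySem.List.pyRange 0 k).foldl
        (fun g i => if lo ≤ i ∧ i < hi then
            PySem.List.pySetD g (i - lo) (F i (PySem.List.pyGetD g (i - lo) d)) else g) g0
      = (List.range g0.length).map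
          (fun (j : Nat) => if (j : Int) < min k hi - lo then F (lo + j) (g0.getD j d) else g0.getD j d) := by
    intro k hk
    induction k, hk using Int.le_induction with
    | base =>
      intro _
      rw [PySem.List.pyRange_one_eq_nil le_rfl, List.foldl_nil]
      have h1 : ∀ j ∈ List.range g0.length,
          (if (j : Int) < min 0 hi - lo then F (lo + j) (g0.getD j d) else g0.getD j d)
          = g0.getD j d := by
        intro j _
        rw [if_neg (by omega)]
      rw [List.map_congr_left h1, pvMapGetDRange]
    | succ k hk ih =>
      intro hkb
      rw [PySem.List.pyRange_one_succ_right hk, List.foldl_append, List.foldl_cons,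
        List.foldl_nil, ih (by omega)]
      by_cases hg : lo ≤ k ∧ k < hi
      · rw [if_pos hg]
        rw [PySem.List.pySetD_of_nonneg _ _ (show (0:Int) ≤ k - lo by omega), pvPyGetD_nonneg _ _ _ (show (0:Int) ≤ k - lo by omega)]
        have hM : ∀ (p : Nat) (hp : p < ((List.range g0.length).map
            (fun (j : Nat) => if (j : Int) < min k hi - lo then F (lo + j) (g0.getD j d) else g0.getD j d)).length),
            ((List.range g0.length).map
            (fun (j : Nat) => if (j : Int) < min k hi - lo then F (lo + j) (g0.getD j d) else g0.getD j d))[p]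
            = if (p : Int) < min k hi - lo then F (lo + p) (g0.getD p d) else g0.getD p d := by
          intro p hp
          simp only [List.getElem_map, List.getElem_range]
        have hplen : ((List.range g0.length).map
            (fun (j : Nat) => if (j : Int) < min k hi - lo then F (lo + j) (g0.getD j d) else g0.getD j d)).length
            = g0.length := by simp
        apply List.ext_getElem (by simp)
        intro j hj1 hj2
        have hjg : j < g0.length := by simpa [hplen] using hj1
        rw [List.getElem_set]
        by_cases hpj : (k - lo).toNat = j
        · rw [if_pos hpj]
          have hMp : ((List.range g0.length).map
              (fun (j : Nat) => if (j : Int) < min k hi - lo then F (lo + j) (g0.getD j d) else g0.getD j d)).getD (k - lo).toNat d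
              = g0.getD (k - lo).toNat d := by
            rw [List.getD_eq_getElem?_getD,
              List.getElem?_eq_getElem (by omega : (k - lo).toNat < ((List.range g0.length).map
              (fun (j : Nat) => if (j : Int) < min k hi - lo then F (lo + j) (g0.getD j d) else g0.getD j d)).length),
              Option.getD_some, hM _ (by omega), if_neg (by omega)]
          rw [hMp]
          simp only [List.getElem_map, List.getElem_range]
          rw [if_pos (by omega)]
          subst hpj
          congr 1
          omega
        · rw [if_neg hpj]
          rw [hM _ (by omega)]
          simp only [List.getElem_map, List.getElem_range]
          by_cases hc : (j : Int) < min k hi - lo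
          · rw [if_pos hc, if_pos (by omega)]
          · rw [if_neg hc, if_neg (by omega)]
      · rw [if_neg hg]
        apply List.map_congr_left
        intro j _
        by_cases hc : (j : Int) < min k hi - lo
        · rw [if_pos hc, if_pos (by omega)]
        · rw [if_neg hc, if_neg (by omega)]
  rw [aux b hb0 le_rfl]
  apply List.map_congr_left
  intro j _
  by_cases hc : (j : Int) < hi - lo
  · rw [if_pos (by omega), if_pos hc]
  · rw [if_neg (by omega), if_neg hc]

lemma pvSetGetSelf {α : Type} (g : List α) (r : Int) (d : α) (hr : 0 ≤ r) :
    PySem.List.pySetD g r (PySem.List.pyGetD g r d) = g := by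
  rw [PySem.List.pySetD_of_nonneg _ _ hr, pvPyGetD_nonneg _ _ _ hr]
  by_cases h : r.toNat < g.length
  · rw [List.getD_eq_getElem _ _ h, List.set_getElem_self]
  · rw [List.set_eq_of_length_le (by omega)]

lemma pvFoldRowOp {α : Type} (cs : List Int) (g : List (List α)) (r : Int) (d : List α)
    (hr : 0 ≤ r) (op : List α → Int → List α) :
    cs.foldl (fun g c => PySem.List.pySetD g r (op (PySem.List.pyGetD g r d) c)) g
    = PySem.List.pySetD g r (cs.foldl op (PySem.List.pyGetD g r d)) := by
  induction cs generalizing g with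
  | nil => rw [List.foldl_nil, List.foldl_nil, pvSetGetSelf _ _ _ hr]
  | cons c cs ih =>
    rw [List.foldl_cons, List.foldl_cons, ih]
    by_cases h : r.toNat < g.length
    · have hget : PySem.List.pyGetD (PySem.List.pySetD g r (op (PySem.List.pyGetD g r d) c)) r d
          = op (PySem.List.pyGetD g r d) c := by
        rw [PySem.List.pySetD_of_nonneg _ _ hr, pvPyGetD_nonneg _ _ _ hr,
          List.getD_eq_getElem _ _ (by simpa using h), List.getElem_set, if_pos rfl]
      rw [hget, PySem.List.pySetD_of_nonneg _ _ hr, PySem.List.pySetD_of_nonneg _ _ hr,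
        PySem.List.pySetD_of_nonneg _ _ hr, List.set_set]
    · have hnoop : ∀ (v : List α), PySem.List.pySetD g r v = g := by
        intro v
        rw [PySem.List.pySetD_of_nonneg _ _ hr, List.set_eq_of_length_le (by omega)]
      rw [hnoop, hnoop, hnoop]

-- fill of a whole row: no guard in the code, all of [0, W) written
lemma pvColFillPlain (W : Nat) (v : Int → Option Int) (row : List (Option Int))
    (hrow : row.length = W) :
    (PySem.List.pyRange 0 (W : Int)).foldl
      (fun row c => PySem.List.pySetD row c (v c)) row
    = (List.range W).map (fun (j : Nat) => v j) := by
  have hstep : ∀ (row' : List (Option Int)), ∀ c ∈ PySem.List.pyRange 0 (W : Int),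
      PySem.List.pySetD row' c (v c)
      = if (0:Int) ≤ c ∧ c < (W : Int) then
          PySem.List.pySetD row' (c - 0) ((fun (i : Int) (_ : Option Int) => v i) c
            (PySem.List.pyGetD row' (c - 0) none)) else row' := by
    intro row' c hc
    have := PySem.List.mem_pyRange_one.mp hc
    rw [if_pos (by omega)]
    norm_num
  rw [PySem.List.foldl_congr_mem _ _ _ _ hstep,
    pvWindowFill (W : Int) 0 (W : Int) (fun (i : Int) (_ : Option Int) => v i) none row
      (by omega) le_rfl le_rfl, hrow]
  apply List.map_congr_left
  intro j hj
  have hjW : j < W := List.mem_range.mp hj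
  rw [if_pos (by omega)]
  norm_num

-- guarded fill c < hi, writing position c (left grid columns)
lemma pvColFillLT (W : Nat) (hi : Int) (v : Int → Option Int) (row : List (Option Int))
    (hhi : hi ≤ (W : Int)) (hrow : row.length = hi.toNat) :
    (PySem.List.pyRange 0 (W : Int)).foldl
      (fun row c => if c < hi then PySem.List.pySetD row c (v c) else row) row
    = (List.range hi.toNat).map (fun (j : Nat) => v j) := by
  have hstep : ∀ (row' : List (Option Int)), ∀ c ∈ PySem.List.pyRange 0 (W : Int),
      (if c < hi then PySem.List.pySetD row' c (v c) else row')
      = if (0:Int) ≤ c ∧ c < hi then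
          PySem.List.pySetD row' (c - 0) ((fun (i : Int) (_ : Option Int) => v i) c
            (PySem.List.pyGetD row' (c - 0) none)) else row' := by
    intro row' c hc
    have := PySem.List.mem_pyRange_one.mp hc
    by_cases h : c < hi
    · rw [if_pos h, if_pos (by omega)]
      norm_num
    · rw [if_neg h, if_neg (by omega)]
  rw [PySem.List.foldl_congr_mem _ _ _ _ hstep,
    pvWindowFill (W : Int) 0 hi (fun (i : Int) (_ : Option Int) => v i) none row
      (by omega) le_rfl hhi, hrow]
  apply List.map_congr_left
  intro j hj
  have hjW : j < hi.toNat := List.mem_range.mp hj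
  rw [if_pos (by omega)]
  norm_num

-- guarded fill lo ≤ c, writing position c - lo (right grid columns)
lemma pvColFillGE (W : Nat) (lo : Int) (v : Int → Option Int) (row : List (Option Int))
    (hlo : 0 ≤ lo) (hrow : row.length = ((W : Int) - lo).toNat) :
    (PySem.List.pyRange 0 (W : Int)).foldl
      (fun row c => if lo ≤ c then PySem.List.pySetD row (c - lo) (v c) else row) row
    = (List.range ((W : Int) - lo).toNat).map (fun (j : Nat) => v (lo + j)) := by
  have hstep : ∀ (row' : List (Option Int)), ∀ c ∈ PySem.List.pyRange 0 (W : Int),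
      (if lo ≤ c then PySem.List.pySetD row' (c - lo) (v c) else row')
      = if lo ≤ c ∧ c < (W : Int) then
          PySem.List.pySetD row' (c - lo) ((fun (i : Int) (_ : Option Int) => v i) c
            (PySem.List.pyGetD row' (c - lo) none)) else row' := by
    intro row' c hc
    have := PySem.List.mem_pyRange_one.mp hc
    by_cases h : lo ≤ c
    · rw [if_pos h, if_pos (by omega)]
    · rw [if_neg h, if_neg (by omega)]
  rw [PySem.List.foldl_congr_mem _ _ _ _ hstep,
    pvWindowFill (W : Int) lo (W : Int) (fun (i : Int) (_ : Option Int) => v i) none row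
      (by omega) hlo le_rfl, hrow]
  apply List.map_congr_left
  intro j hj
  have hjW : j < ((W : Int) - lo).toNat := List.mem_range.mp hj
  rw [if_pos (by omega)]

lemma pvGridTop (pattern : List (List Int)) (ro : Int) (hro : 0 ≤ ro)
    (hw : ∀ row ∈ pattern, pattern.headI.length ≤ row.length) :
    (PySem.List.pyRange 0 (pattern.length : Int)).foldl (fun g r =>
      (PySem.List.pyRange 0 (pattern.headI.length : Int)).foldl (fun g c =>
        if r < (pattern.length : Int) - ro then
          pvSetCell g r c (some (PySem.List.pyGetD (PySem.List.pyGetD pattern r []) c 0))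
        else g) g)
      ((PySem.List.pyRange 0 ((pattern.length : Int) - ro)).map (fun _ =>
        (PySem.List.pyRange 0 (pattern.headI.length : Int)).map (fun _ => (none : Option Int))))
    = ((PySem.List.slice pattern none (some (max 0 ((pattern.length : Int) - ro)))).map
        (fun row => PySem.List.slice row none (some (pattern.headI.length : Int)))).map
        (fun row => row.map some) := by
  set H := pattern.length with hH
  set W := pattern.headI.length with hW
  have hstep : ∀ (g : List (List (Option Int))), ∀ r ∈ PySem.List.pyRange 0 (H : Int),
      (PySem.List.pyRange 0 (W : Int)).foldl (fun g c =>
        if r < (H : Int) - ro then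
          pvSetCell g r c (some (PySem.List.pyGetD (PySem.List.pyGetD pattern r []) c 0))
        else g) g
      = if (0:Int) ≤ r ∧ r < (H : Int) - ro then
          PySem.List.pySetD g (r - 0)
            ((fun (i : Int) (old : List (Option Int)) =>
              (PySem.List.pyRange 0 (W : Int)).foldl (fun row c =>
                PySem.List.pySetD row c
                  (some (PySem.List.pyGetD (PySem.List.pyGetD pattern i []) c 0))) old) r
              (PySem.List.pyGetD g (r - 0) []))
        else g := by
    intro g r hr
    have hmem := PySem.List.mem_pyRange_one.mp hr
    by_cases hg : r < (H : Int) - ro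
    · simp only [if_pos hg, if_pos (And.intro hmem.1 hg), sub_zero]
      exact pvFoldRowOp (PySem.List.pyRange 0 (W : Int)) g r [] hmem.1
        (fun row c => PySem.List.pySetD row c
          (some (PySem.List.pyGetD (PySem.List.pyGetD pattern r []) c 0)))
    · simp only [if_neg hg, if_neg (fun (h : (0:Int) ≤ r ∧ r < (H:Int) - ro) => hg h.2)]
      exact PySem.List.foldl_ignore _ _
  rw [PySem.List.foldl_congr_mem _ _ _ _ hstep,
    pvWindowFill (H : Int) 0 ((H : Int) - ro)
      (fun (i : Int) (old : List (Option Int)) =>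
        (PySem.List.pyRange 0 (W : Int)).foldl (fun row c =>
          PySem.List.pySetD row c
            (some (PySem.List.pyGetD (PySem.List.pyGetD pattern i []) c 0))) old) []
      _ (by omega) le_rfl (by omega)]
  apply List.ext_getElem
  · simp [PySem.List.length_pyRange_one, PySem.List.slice_to _ (le_max_left 0 _)]
    omega
  intro j hj1 hj2
  have hjlen : j < ((H : Int) - ro).toNat := by
    simpa [PySem.List.length_pyRange_one] using hj1
  have hjH : j < H := by omega
  simp only [List.getElem_map, List.getElem_range]
  have hrow0 : ((PySem.List.pyRange 0 ((H : Int) - ro)).map (fun _ =>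
      (PySem.List.pyRange 0 (W : Int)).map (fun _ => (none : Option Int)))).getD j []
      = (PySem.List.pyRange 0 (W : Int)).map (fun _ => (none : Option Int)) := by
    rw [List.getD_eq_getElem _ _ (by simp [PySem.List.length_pyRange_one]; omega)]
    simp
  rw [if_pos (by omega), hrow0, zero_add,
    pvColFillPlain W _ _ (by simp [PySem.List.length_pyRange_one])]
  -- right side
  simp only [PySem.List.slice_to _ (le_max_left 0 ((H:Int) - ro)),
    PySem.List.slice_to _ (show (0:Int) ≤ (W:Int) by positivity),
    List.getElem_take, Int.toNat_natCast]
  have hwj : W ≤ pattern[j].length := hw _ (List.getElem_mem _)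
  apply List.ext_getElem
  · simp; omega
  intro c hc1 hc2
  have hcW : c < W := by simpa using hc1
  simp only [List.getElem_map, List.getElem_range, List.getElem_take]
  simp only [PySem.List.pyGetD_natCast]
  rw [List.getD_eq_getElem _ _ hjH]
  rw [List.getD_eq_getElem _ _ (by omega : c < pattern[j].length)]

lemma pvGridBottom (pattern : List (List Int)) (ro : Int) (hro : 0 ≤ ro)
    (hw : ∀ row ∈ pattern, pattern.headI.length ≤ row.length) :
    (PySem.List.pyRange 0 (pattern.length : Int)).foldl (fun g r =>
      (PySem.List.pyRange 0 (pattern.headI.length : Int)).foldl (fun g c =>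
        if ro ≤ r then
          pvSetCell g (r - ro) c (some (PySem.List.pyGetD (PySem.List.pyGetD pattern r []) c 0))
        else g) g)
      ((PySem.List.pyRange 0 ((pattern.length : Int) - ro)).map (fun _ =>
        (PySem.List.pyRange 0 (pattern.headI.length : Int)).map (fun _ => (none : Option Int))))
    = ((PySem.List.slice pattern (some ro) (some (pattern.length : Int))).map
        (fun row => PySem.List.slice row none (some (pattern.headI.length : Int)))).map
        (fun row => row.map some) := by
  set H := pattern.length with hH
  set W := pattern.headI.length with hW
  have hstep : ∀ (g : List (List (Option Int))), ∀ r ∈ PySem.List.pyRange 0 (H : Int),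
      (PySem.List.pyRange 0 (W : Int)).foldl (fun g c =>
        if ro ≤ r then
          pvSetCell g (r - ro) c (some (PySem.List.pyGetD (PySem.List.pyGetD pattern r []) c 0))
        else g) g
      = if ro ≤ r ∧ r < (H : Int) then
          PySem.List.pySetD g (r - ro)
            ((fun (i : Int) (old : List (Option Int)) =>
              (PySem.List.pyRange 0 (W : Int)).foldl (fun row c =>
                PySem.List.pySetD row c
                  (some (PySem.List.pyGetD (PySem.List.pyGetD pattern i []) c 0))) old) r
              (PySem.List.pyGetD g (r - ro) []))
        else g := by
    intro g r hr
    have hmem := PySem.List.mem_pyRange_one.mp hr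
    by_cases hg : ro ≤ r
    · simp only [if_pos hg, if_pos (And.intro hg hmem.2)]
      exact pvFoldRowOp (PySem.List.pyRange 0 (W : Int)) g (r - ro) [] (by omega)
        (fun row c => PySem.List.pySetD row c
          (some (PySem.List.pyGetD (PySem.List.pyGetD pattern r []) c 0)))
    · simp only [if_neg hg, if_neg (fun (h : ro ≤ r ∧ r < (H:Int)) => hg h.1)]
      exact PySem.List.foldl_ignore _ _
  rw [PySem.List.foldl_congr_mem _ _ _ _ hstep,
    pvWindowFill (H : Int) ro (H : Int)
      (fun (i : Int) (old : List (Option Int)) =>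
        (PySem.List.pyRange 0 (W : Int)).foldl (fun row c =>
          PySem.List.pySetD row c
            (some (PySem.List.pyGetD (PySem.List.pyGetD pattern i []) c 0))) old) []
      _ (by omega) hro le_rfl]
  apply List.ext_getElem
  · simp [PySem.List.length_pyRange_one, PySem.List.slice_toNat _ hro (by positivity : (0:Int) ≤ (H:Int))]
    omega
  intro j hj1 hj2
  have hjlen : j < ((H : Int) - ro).toNat := by
    simpa [PySem.List.length_pyRange_one] using hj1
  simp only [List.getElem_map, List.getElem_range]
  have hrow0 : ((PySem.List.pyRange 0 ((H : Int) - ro)).map (fun _ =>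
      (PySem.List.pyRange 0 (W : Int)).map (fun _ => (none : Option Int)))).getD j []
      = (PySem.List.pyRange 0 (W : Int)).map (fun _ => (none : Option Int)) := by
    rw [List.getD_eq_getElem _ _ (by simp [PySem.List.length_pyRange_one]; omega)]
    simp
  rw [if_pos (by omega), hrow0,
    pvColFillPlain W _ _ (by simp [PySem.List.length_pyRange_one])]
  simp only [PySem.List.slice_toNat _ hro (by positivity : (0:Int) ≤ (H:Int)),
    PySem.List.slice_to _ (show (0:Int) ≤ (W:Int) by positivity),
    List.getElem_take, List.getElem_drop, Int.toNat_natCast]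
  have hjH : ro.toNat + j < H := by omega
  have hwj : W ≤ pattern[ro.toNat + j].length := hw _ (List.getElem_mem _)
  apply List.ext_getElem
  · simp; omega
  intro c hc1 hc2
  have hcW : c < W := by simpa using hc1
  simp only [List.getElem_map, List.getElem_range, List.getElem_take, List.getElem_drop]
  have hcast : ro + (j : Int) = ((ro.toNat + j : Nat) : Int) := by omega
  rw [hcast]
  simp only [PySem.List.pyGetD_natCast]
  rw [List.getD_eq_getElem _ _ hjH]
  rw [List.getD_eq_getElem _ _ (by omega : c < pattern[ro.toNat + j].length)]

lemma pvGridLeft (pattern : List (List Int)) (co : Int) (hco : 0 ≤ co)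
    (hw : ∀ row ∈ pattern, pattern.headI.length ≤ row.length) :
    (PySem.List.pyRange 0 (pattern.length : Int)).foldl (fun g r =>
      (PySem.List.pyRange 0 (pattern.headI.length : Int)).foldl (fun g c =>
        if c < (pattern.headI.length : Int) - co then
          pvSetCell g r c (some (PySem.List.pyGetD (PySem.List.pyGetD pattern r []) c 0))
        else g) g)
      ((PySem.List.pyRange 0 (pattern.length : Int)).map (fun _ =>
        (PySem.List.pyRange 0 ((pattern.headI.length : Int) - co)).map (fun _ => (none : Option Int))))
    = (pattern.map
        (fun row => PySem.List.slice row none (some (max 0 ((pattern.headI.length : Int) - co))))).map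
        (fun row => row.map some) := by
  set H := pattern.length with hH
  set W := pattern.headI.length with hW
  have hstep : ∀ (g : List (List (Option Int))), ∀ r ∈ PySem.List.pyRange 0 (H : Int),
      (PySem.List.pyRange 0 (W : Int)).foldl (fun g c =>
        if c < (W : Int) - co then
          pvSetCell g r c (some (PySem.List.pyGetD (PySem.List.pyGetD pattern r []) c 0))
        else g) g
      = if (0:Int) ≤ r ∧ r < (H : Int) then
          PySem.List.pySetD g (r - 0)
            ((fun (i : Int) (old : List (Option Int)) =>
              (PySem.List.pyRange 0 (W : Int)).foldl (fun row c =>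
                if c < (W : Int) - co then PySem.List.pySetD row c
                  (some (PySem.List.pyGetD (PySem.List.pyGetD pattern i []) c 0)) else row) old) r
              (PySem.List.pyGetD g (r - 0) []))
        else g := by
    intro g r hr
    have hmem := PySem.List.mem_pyRange_one.mp hr
    rw [if_pos (And.intro hmem.1 hmem.2), sub_zero]
    have hcongr : ∀ (g' : List (List (Option Int))), ∀ c ∈ PySem.List.pyRange 0 (W : Int),
        (if c < (W : Int) - co then
          pvSetCell g' r c (some (PySem.List.pyGetD (PySem.List.pyGetD pattern r []) c 0))
        else g')
        = PySem.List.pySetD g' r ((fun (row : List (Option Int)) (c : Int) =>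
            if c < (W : Int) - co then PySem.List.pySetD row c
              (some (PySem.List.pyGetD (PySem.List.pyGetD pattern r []) c 0)) else row)
            (PySem.List.pyGetD g' r []) c) := by
      intro g' c _
      by_cases h : c < (W : Int) - co
      · simp only [if_pos h]
        rfl
      · simp only [if_neg h]
        exact (pvSetGetSelf g' r [] hmem.1).symm
    rw [PySem.List.foldl_congr_mem _ _ _ _ hcongr]
    exact pvFoldRowOp (PySem.List.pyRange 0 (W : Int)) g r [] hmem.1
      (fun (row : List (Option Int)) (c : Int) =>
        if c < (W : Int) - co then PySem.List.pySetD row c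
          (some (PySem.List.pyGetD (PySem.List.pyGetD pattern r []) c 0)) else row)
  rw [PySem.List.foldl_congr_mem _ _ _ _ hstep,
    pvWindowFill (H : Int) 0 (H : Int)
      (fun (i : Int) (old : List (Option Int)) =>
        (PySem.List.pyRange 0 (W : Int)).foldl (fun row c =>
          if c < (W : Int) - co then PySem.List.pySetD row c
            (some (PySem.List.pyGetD (PySem.List.pyGetD pattern i []) c 0)) else row) old) []
      _ (by omega) le_rfl le_rfl]
  apply List.ext_getElem
  · simp [PySem.List.length_pyRange_one]
    omega
  intro j hj1 hj2
  have hjH : j < H := by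
    simpa [PySem.List.length_pyRange_one] using hj1
  simp only [List.getElem_map, List.getElem_range]
  have hrow0 : ((PySem.List.pyRange 0 (H : Int)).map (fun _ =>
      (PySem.List.pyRange 0 ((W : Int) - co)).map (fun _ => (none : Option Int)))).getD j []
      = (PySem.List.pyRange 0 ((W : Int) - co)).map (fun _ => (none : Option Int)) := by
    rw [List.getD_eq_getElem _ _ (by simp [PySem.List.length_pyRange_one]; omega)]
    simp
  rw [if_pos (by omega), hrow0, zero_add,
    pvColFillLT W ((W : Int) - co) _ _ (by omega) (by simp [PySem.List.length_pyRange_one])]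
  simp only [PySem.List.slice_to _ (le_max_left 0 ((W : Int) - co)), List.getElem_take]
  have hwj : W ≤ pattern[j].length := hw _ (List.getElem_mem _)
  have hmax : (max 0 ((W : Int) - co)).toNat = ((W : Int) - co).toNat := by omega
  rw [hmax]
  apply List.ext_getElem
  · simp; omega
  intro c hc1 hc2
  have hcW : c < ((W : Int) - co).toNat := by simpa using hc1
  simp only [List.getElem_map, List.getElem_range, List.getElem_take]
  simp only [PySem.List.pyGetD_natCast]
  rw [List.getD_eq_getElem _ _ hjH]
  rw [List.getD_eq_getElem _ _ (by omega : c < pattern[j].length)]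

lemma pvGridRight (pattern : List (List Int)) (co : Int) (hco : 0 ≤ co)
    (hw : ∀ row ∈ pattern, pattern.headI.length ≤ row.length) :
    (PySem.List.pyRange 0 (pattern.length : Int)).foldl (fun g r =>
      (PySem.List.pyRange 0 (pattern.headI.length : Int)).foldl (fun g c =>
        if co ≤ c then
          pvSetCell g r (c - co) (some (PySem.List.pyGetD (PySem.List.pyGetD pattern r []) c 0))
        else g) g)
      ((PySem.List.pyRange 0 (pattern.length : Int)).map (fun _ =>
        (PySem.List.pyRange 0 ((pattern.headI.length : Int) - co)).map (fun _ => (none : Option Int))))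
    = (pattern.map
        (fun row => PySem.List.slice row (some co) (some (pattern.headI.length : Int)))).map
        (fun row => row.map some) := by
  set H := pattern.length with hH
  set W := pattern.headI.length with hW
  have hstep : ∀ (g : List (List (Option Int))), ∀ r ∈ PySem.List.pyRange 0 (H : Int),
      (PySem.List.pyRange 0 (W : Int)).foldl (fun g c =>
        if co ≤ c then
          pvSetCell g r (c - co) (some (PySem.List.pyGetD (PySem.List.pyGetD pattern r []) c 0))
        else g) g
      = if (0:Int) ≤ r ∧ r < (H : Int) then
          PySem.List.pySetD g (r - 0)
            ((fun (i : Int) (old : List (Option Int)) =>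
              (PySem.List.pyRange 0 (W : Int)).foldl (fun row c =>
                if co ≤ c then PySem.List.pySetD row (c - co)
                  (some (PySem.List.pyGetD (PySem.List.pyGetD pattern i []) c 0)) else row) old) r
              (PySem.List.pyGetD g (r - 0) []))
        else g := by
    intro g r hr
    have hmem := PySem.List.mem_pyRange_one.mp hr
    rw [if_pos (And.intro hmem.1 hmem.2), sub_zero]
    have hcongr : ∀ (g' : List (List (Option Int))), ∀ c ∈ PySem.List.pyRange 0 (W : Int),
        (if co ≤ c then
          pvSetCell g' r (c - co) (some (PySem.List.pyGetD (PySem.List.pyGetD pattern r []) c 0))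
        else g')
        = PySem.List.pySetD g' r ((fun (row : List (Option Int)) (c : Int) =>
            if co ≤ c then PySem.List.pySetD row (c - co)
              (some (PySem.List.pyGetD (PySem.List.pyGetD pattern r []) c 0)) else row)
            (PySem.List.pyGetD g' r []) c) := by
      intro g' c _
      by_cases h : co ≤ c
      · simp only [if_pos h]
        rfl
      · simp only [if_neg h]
        exact (pvSetGetSelf g' r [] hmem.1).symm
    rw [PySem.List.foldl_congr_mem _ _ _ _ hcongr]
    exact pvFoldRowOp (PySem.List.pyRange 0 (W : Int)) g r [] hmem.1
      (fun (row : List (Option Int)) (c : Int) =>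
        if co ≤ c then PySem.List.pySetD row (c - co)
          (some (PySem.List.pyGetD (PySem.List.pyGetD pattern r []) c 0)) else row)
  rw [PySem.List.foldl_congr_mem _ _ _ _ hstep,
    pvWindowFill (H : Int) 0 (H : Int)
      (fun (i : Int) (old : List (Option Int)) =>
        (PySem.List.pyRange 0 (W : Int)).foldl (fun row c =>
          if co ≤ c then PySem.List.pySetD row (c - co)
            (some (PySem.List.pyGetD (PySem.List.pyGetD pattern i []) c 0)) else row) old) []
      _ (by omega) le_rfl le_rfl]
  apply List.ext_getElem
  · simp [PySem.List.length_pyRange_one]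
    omega
  intro j hj1 hj2
  have hjH : j < H := by
    simpa [PySem.List.length_pyRange_one] using hj1
  simp only [List.getElem_map, List.getElem_range]
  have hrow0 : ((PySem.List.pyRange 0 (H : Int)).map (fun _ =>
      (PySem.List.pyRange 0 ((W : Int) - co)).map (fun _ => (none : Option Int)))).getD j []
      = (PySem.List.pyRange 0 ((W : Int) - co)).map (fun _ => (none : Option Int)) := by
    rw [List.getD_eq_getElem _ _ (by simp [PySem.List.length_pyRange_one]; omega)]
    simp
  rw [if_pos (by omega), hrow0, zero_add,
    pvColFillGE W co _ _ hco (by simp [PySem.List.length_pyRange_one])]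
  simp only [PySem.List.slice_toNat _ hco (show (0:Int) ≤ (W:Int) by positivity),
    List.getElem_take, List.getElem_drop, Int.toNat_natCast]
  have hwj : W ≤ pattern[j].length := hw _ (List.getElem_mem _)
  apply List.ext_getElem
  · simp; omega
  intro c hc1 hc2
  have hcW : c < ((W : Int) - co).toNat := by simpa using hc1
  simp only [List.getElem_map, List.getElem_range, List.getElem_take, List.getElem_drop]
  have hcast : co + (c : Int) = ((co.toNat + c : Nat) : Int) := by omega
  rw [hcast]
  simp only [PySem.List.pyGetD_natCast]
  rw [List.getD_eq_getElem _ _ hjH]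
  rw [List.getD_eq_getElem _ _ (by omega : co.toNat + c < pattern[j].length)]


def pvMk4 (a b l r : List (List Int)) : PySem.Dict String (List (List Int)) :=
  PySem.Dict.mk [("above", a), ("below", b), ("left", l), ("right", r)]

lemma pvOfList4 (a b l r : List (List Int)) :
    PySem.Dict.ofList [("above", a), ("below", b), ("left", l), ("right", r)]
    = pvMk4 a b l r := by rfl

lemma pvModifyInsert {κ ν : Type} [BEq κ] [LawfulBEq κ] (d : PySem.Dict κ ν) (k : κ)
    (v dflt : ν) (f : ν → ν) :
    (d.insert k v).modify k dflt f = d.insert k (f v) := by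
  unfold PySem.Dict.modify
  rw [PySem.Dict.getD_insert_self, PySem.Dict.insert_insert_self]

lemma pvFoldModifyInsert {κ ν α : Type} [BEq κ] [LawfulBEq κ] (l : List α)
    (d : PySem.Dict κ ν) (k : κ) (dflt : ν) (g : α → ν → ν) (e : ν) :
    l.foldl (fun d x => d.modify k dflt (fun v => g x v)) (d.insert k e)
    = d.insert k (l.foldl (fun v x => g x v) e) := by
  induction l generalizing e with
  | nil => rfl
  | cons x xs ih =>
    rw [List.foldl_cons, pvModifyInsert, ih, List.foldl_cons]

lemma pvFoldFoldModifyInsert {κ ν α β : Type} [BEq κ] [LawfulBEq κ] (l : List α)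
    (dirs : α → List β) (d : PySem.Dict κ ν) (k : κ) (dflt : ν) (g : α → β → ν → ν) (e : ν) :
    l.foldl (fun d x => (dirs x).foldl
      (fun d s => d.modify k dflt (fun v => g x s v)) d) (d.insert k e)
    = d.insert k (l.foldl (fun e x => (dirs x).foldl (fun e s => g x s e) e) e) := by
  induction l generalizing e with
  | nil => rfl
  | cons x xs ih =>
    rw [List.foldl_cons, pvFoldModifyInsert, ih, List.foldl_cons]

lemma pvMod4_above (a b l r : List (List Int)) (f : List (List Int) → List (List Int)) :
    (pvMk4 a b l r).modify "above" [] f = pvMk4 (f a) b l r := by rfl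
lemma pvMod4_below (a b l r : List (List Int)) (f : List (List Int) → List (List Int)) :
    (pvMk4 a b l r).modify "below" [] f = pvMk4 a (f b) l r := by rfl
lemma pvMod4_left (a b l r : List (List Int)) (f : List (List Int) → List (List Int)) :
    (pvMk4 a b l r).modify "left" [] f = pvMk4 a b (f l) r := by rfl
lemma pvMod4_right (a b l r : List (List Int)) (f : List (List Int) → List (List Int)) :
    (pvMk4 a b l r).modify "right" [] f = pvMk4 a b l (f r) := by rfl

lemma pvStepEntry (c1 c2 c3 c4 : Prop) [Decidable c1] [Decidable c2] [Decidable c3]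
    [Decidable c4] (v : List Int) (a b l r : List (List Int)) :
    ((if c4 then
        (if c3 then
          (if c2 then
            (if c1 then ([] : List String) ++ ["below"] else []) ++ ["above"]
           else (if c1 then ([] : List String) ++ ["below"] else [])) ++ ["right"]
         else (if c2 then
            (if c1 then ([] : List String) ++ ["below"] else []) ++ ["above"]
           else (if c1 then ([] : List String) ++ ["below"] else []))) ++ ["left"]
      else
        (if c3 then
          (if c2 then
            (if c1 then ([] : List String) ++ ["below"] else []) ++ ["above"]
           else (if c1 then ([] : List String) ++ ["below"] else [])) ++ ["right"]
         else (if c2 then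
            (if c1 then ([] : List String) ++ ["below"] else []) ++ ["above"]
           else (if c1 then ([] : List String) ++ ["below"] else [])))).foldl
      (fun e s => e.modify s [] (fun x => x ++ [v])) (pvMk4 a b l r))
    = pvMk4 (if c2 then a ++ [v] else a) (if c1 then b ++ [v] else b)
        (if c4 then l ++ [v] else l) (if c3 then r ++ [v] else r) := by
  split_ifs <;>
    simp [List.foldl_cons, List.foldl_nil, pvMod4_above, pvMod4_below, pvMod4_left,
      pvMod4_right]

lemma pvFoldSplit4 {α β : Type} (cs : List β) (f1 f2 f3 f4 : α → β → α) (st : α × α × α × α) :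
    cs.foldl (fun s c => (f1 s.1 c, f2 s.2.1 c, f3 s.2.2.1 c, f4 s.2.2.2 c)) st
    = (cs.foldl f1 st.1, cs.foldl f2 st.2.1, cs.foldl f3 st.2.2.1, cs.foldl f4 st.2.2.2) := by
  induction cs generalizing st with
  | nil => simp
  | cons c cs ih =>
    simp only [List.foldl_cons]
    exact ih _

lemma pvIdxGetD {β κ : Type} [BEq κ] [LawfulBEq κ] (l : List β) (sl : β → κ)
    (pr : β → List Int) (c : κ) :
    (l.foldl (fun d q => d.modify (sl q) [] (fun x => x ++ [pr q]))
      (PySem.Dict.empty : PySem.Dict κ (List (List Int)))).getD c []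
    = (l.filter (fun q => sl q == c)).map pr := by
  have h := PySem.Dict.getD_foldl_modify_append (l.map (fun q => (sl q, pr q)))
    (PySem.Dict.empty : PySem.Dict κ (List (List Int))) c
  rw [List.foldl_map] at h
  simp only [List.filter_map, List.map_map] at h
  simpa [Function.comp, PySem.Dict.getD_empty] using h

lemma pvEntryFold (ps : List (List (List Int))) (C1 C2 C3 C4 : List (List Int) → Prop)
    [DecidablePred C1] [DecidablePred C2] [DecidablePred C3] [DecidablePred C4]
    (key : List (List Int) → List Int) (a b l r : List (List Int)) :
    ps.foldl (fun e p2 =>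
      ((if C4 p2 then
          (if C3 p2 then
            (if C2 p2 then
              (if C1 p2 then ([] : List String) ++ ["below"] else []) ++ ["above"]
             else (if C1 p2 then ([] : List String) ++ ["below"] else [])) ++ ["right"]
           else (if C2 p2 then
              (if C1 p2 then ([] : List String) ++ ["below"] else []) ++ ["above"]
             else (if C1 p2 then ([] : List String) ++ ["below"] else []))) ++ ["left"]
        else
          (if C3 p2 then
            (if C2 p2 then
              (if C1 p2 then ([] : List String) ++ ["below"] else []) ++ ["above"]
             else (if C1 p2 then ([] : List String) ++ ["below"] else [])) ++ ["right"]
           else (if C2 p2 then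
              (if C1 p2 then ([] : List String) ++ ["below"] else []) ++ ["above"]
             else (if C1 p2 then ([] : List String) ++ ["below"] else [])))).foldl
        (fun e s => e.modify s [] (fun x => x ++ [key p2])) e)) (pvMk4 a b l r)
    = pvMk4 (a ++ (ps.filter (fun p2 => decide (C2 p2))).map key)
        (b ++ (ps.filter (fun p2 => decide (C1 p2))).map key)
        (l ++ (ps.filter (fun p2 => decide (C4 p2))).map key)
        (r ++ (ps.filter (fun p2 => decide (C3 p2))).map key) := by
  induction ps generalizing a b l r with
  | nil => simp
  | cons p ps ih =>
    rw [List.foldl_cons, pvStepEntry (C1 p) (C2 p) (C3 p) (C4 p), ih]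
    have e1 : (if C2 p then a ++ [key p] else a)
        ++ (ps.filter (fun p2 => decide (C2 p2))).map key
        = a ++ ((p :: ps).filter (fun p2 => decide (C2 p2))).map key := by
      by_cases h : C2 p <;> simp [h, List.filter_cons]
    have e2 : (if C1 p then b ++ [key p] else b)
        ++ (ps.filter (fun p2 => decide (C1 p2))).map key
        = b ++ ((p :: ps).filter (fun p2 => decide (C1 p2))).map key := by
      by_cases h : C1 p <;> simp [h, List.filter_cons]
    have e3 : (if C4 p then l ++ [key p] else l)
        ++ (ps.filter (fun p2 => decide (C4 p2))).map key
        = l ++ ((p :: ps).filter (fun p2 => decide (C4 p2))).map key := by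
      by_cases h : C4 p <;> simp [h, List.filter_cons]
    have e4 : (if C3 p then r ++ [key p] else r)
        ++ (ps.filter (fun p2 => decide (C3 p2))).map key
        = r ++ ((p :: ps).filter (fun p2 => decide (C3 p2))).map key := by
      by_cases h : C3 p <;> simp [h, List.filter_cons]
    rw [e1, e2, e3, e4]

lemma pvCondIff (x y : List (List Int)) :
    x.map (fun row => row.map some) = y.map (fun row => row.map some) ↔ x = y := by
  constructor
  · intro h
    exact List.map_injective_iff.mpr
      (fun a b hab => List.map_injective_iff.mpr (Option.some_injective _) hab) h
  · intro h
    rw [h]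

lemma pvSlicesSpec (pattern : List (List Int)) (ro co : Int) (hro : 0 ≤ ro) (hco : 0 ≤ co)
    (hne : pattern ≠ []) (hw : ∀ row ∈ pattern, pattern.headI.length ≤ row.length) :
    get_pattern_slices pattern ro co =
      ((pvSlices pattern ro co).1.map (fun row => row.map some),
       (pvSlices pattern ro co).2.1.map (fun row => row.map some),
       (pvSlices pattern ro co).2.2.1.map (fun row => row.map some),
       (pvSlices pattern ro co).2.2.2.map (fun row => row.map some)) := by
  have hget0 : PySem.List.pyGetD pattern 0 [] = pattern.headI := by
    cases pattern with
    | nil => exact absurd rfl hne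
    | cons x xs => rw [PySem.List.pyGetD_zero_cons]; rfl
  simp only [get_pattern_slices, pvSlices, hget0, PySem.List.len_eq]
  have hsplit : ∀ (st : List (List (Option Int)) × List (List (Option Int)) ×
      List (List (Option Int)) × List (List (Option Int))), ∀ r ∈ PySem.List.pyRange 0 (pattern.length : Int),
      (PySem.List.pyRange 0 (pattern.headI.length : Int)).foldl (fun st c =>
        ( if r < (pattern.length : Int) - ro then
            pvSetCell st.1 r c (some (PySem.List.pyGetD (PySem.List.pyGetD pattern r []) c 0)) else st.1,
          if ro ≤ r then
            pvSetCell st.2.1 (r - ro) c (some (PySem.List.pyGetD (PySem.List.pyGetD pattern r []) c 0)) else st.2.1,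
          if c < (pattern.headI.length : Int) - co then
            pvSetCell st.2.2.1 r c (some (PySem.List.pyGetD (PySem.List.pyGetD pattern r []) c 0)) else st.2.2.1,
          if co ≤ c then
            pvSetCell st.2.2.2 r (c - co) (some (PySem.List.pyGetD (PySem.List.pyGetD pattern r []) c 0)) else st.2.2.2 )) st
      = ( (PySem.List.pyRange 0 (pattern.headI.length : Int)).foldl (fun g c =>
            if r < (pattern.length : Int) - ro then
              pvSetCell g r c (some (PySem.List.pyGetD (PySem.List.pyGetD pattern r []) c 0)) else g) st.1,
          (PySem.List.pyRange 0 (pattern.headI.length : Int)).foldl (fun g c =>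
            if ro ≤ r then
              pvSetCell g (r - ro) c (some (PySem.List.pyGetD (PySem.List.pyGetD pattern r []) c 0)) else g) st.2.1,
          (PySem.List.pyRange 0 (pattern.headI.length : Int)).foldl (fun g c =>
            if c < (pattern.headI.length : Int) - co then
              pvSetCell g r c (some (PySem.List.pyGetD (PySem.List.pyGetD pattern r []) c 0)) else g) st.2.2.1,
          (PySem.List.pyRange 0 (pattern.headI.length : Int)).foldl (fun g c =>
            if co ≤ c then
              pvSetCell g r (c - co) (some (PySem.List.pyGetD (PySem.List.pyGetD pattern r []) c 0)) else g) st.2.2.2 ) := by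
    intro st r _
    exact pvFoldSplit4 _ (fun g c =>
            if r < (pattern.length : Int) - ro then
              pvSetCell g r c (some (PySem.List.pyGetD (PySem.List.pyGetD pattern r []) c 0)) else g) (fun g c =>
            if ro ≤ r then
              pvSetCell g (r - ro) c (some (PySem.List.pyGetD (PySem.List.pyGetD pattern r []) c 0)) else g) (fun g c =>
            if c < (pattern.headI.length : Int) - co then
              pvSetCell g r c (some (PySem.List.pyGetD (PySem.List.pyGetD pattern r []) c 0)) else g) (fun g c =>
            if co ≤ c then
              pvSetCell g r (c - co) (some (PySem.List.pyGetD (PySem.List.pyGetD pattern r []) c 0)) else g) st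
  refine Eq.trans (PySem.List.foldl_congr_mem _ _ _ _ hsplit) (Eq.trans (pvFoldSplit4 _
    (fun g r => (PySem.List.pyRange 0 (pattern.headI.length : Int)).foldl (fun g c =>
            if r < (pattern.length : Int) - ro then
              pvSetCell g r c (some (PySem.List.pyGetD (PySem.List.pyGetD pattern r []) c 0)) else g) g)
    (fun g r => (PySem.List.pyRange 0 (pattern.headI.length : Int)).foldl (fun g c =>
            if ro ≤ r then
              pvSetCell g (r - ro) c (some (PySem.List.pyGetD (PySem.List.pyGetD pattern r []) c 0)) else g) g)
    (fun g r => (PySem.List.pyRange 0 (pattern.headI.length : Int)).foldl (fun g c =>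
            if c < (pattern.headI.length : Int) - co then
              pvSetCell g r c (some (PySem.List.pyGetD (PySem.List.pyGetD pattern r []) c 0)) else g) g)
    (fun g r => (PySem.List.pyRange 0 (pattern.headI.length : Int)).foldl (fun g c =>
            if co ≤ c then
              pvSetCell g r (c - co) (some (PySem.List.pyGetD (PySem.List.pyGetD pattern r []) c 0)) else g) g) _) ?_)
  refine Prod.ext ?_ (Prod.ext ?_ (Prod.ext ?_ ?_))
  · exact pvGridTop pattern ro hro hw
  · exact pvGridBottom pattern ro hro hw
  · exact pvGridLeft pattern co hco hw
  · exact pvGridRight pattern co hco hw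

lemma pvSlicesDeg (pattern : List (List Int)) (ro co : Int) (hro : 0 ≤ ro) (hco : 0 ≤ co)
    (hne : pattern ≠ []) (hro2 : (pattern.length : Int) ≤ ro)
    (hco2 : (pattern.headI.length : Int) ≤ co) :
    get_pattern_slices pattern ro co =
      ((pvSlices pattern ro co).1.map (fun row => row.map some),
       (pvSlices pattern ro co).2.1.map (fun row => row.map some),
       (pvSlices pattern ro co).2.2.1.map (fun row => row.map some),
       (pvSlices pattern ro co).2.2.2.map (fun row => row.map some)) := by
  have hget0 : PySem.List.pyGetD pattern 0 [] = pattern.headI := by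
    cases pattern with
    | nil => exact absurd rfl hne
    | cons x xs => rw [PySem.List.pyGetD_zero_cons]; rfl
  simp only [get_pattern_slices, pvSlices, hget0, PySem.List.len_eq]
  have hid : ∀ (st : List (List (Option Int)) × List (List (Option Int)) ×
      List (List (Option Int)) × List (List (Option Int))),
      ∀ r ∈ PySem.List.pyRange 0 (pattern.length : Int),
      (PySem.List.pyRange 0 (pattern.headI.length : Int)).foldl (fun st c =>
        ( if r < (pattern.length : Int) - ro then
            pvSetCell st.1 r c (some (PySem.List.pyGetD (PySem.List.pyGetD pattern r []) c 0)) else st.1,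
          if ro ≤ r then
            pvSetCell st.2.1 (r - ro) c (some (PySem.List.pyGetD (PySem.List.pyGetD pattern r []) c 0)) else st.2.1,
          if c < (pattern.headI.length : Int) - co then
            pvSetCell st.2.2.1 r c (some (PySem.List.pyGetD (PySem.List.pyGetD pattern r []) c 0)) else st.2.2.1,
          if co ≤ c then
            pvSetCell st.2.2.2 r (c - co) (some (PySem.List.pyGetD (PySem.List.pyGetD pattern r []) c 0)) else st.2.2.2 )) st
      = st := by
    intro st r hr
    have hmem := PySem.List.mem_pyRange_one.mp hr
    have hstep : ∀ (st' : List (List (Option Int)) × List (List (Option Int)) ×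
        List (List (Option Int)) × List (List (Option Int))),
        ∀ c ∈ PySem.List.pyRange 0 (pattern.headI.length : Int),
        ( if r < (pattern.length : Int) - ro then
            pvSetCell st'.1 r c (some (PySem.List.pyGetD (PySem.List.pyGetD pattern r []) c 0)) else st'.1,
          if ro ≤ r then
            pvSetCell st'.2.1 (r - ro) c (some (PySem.List.pyGetD (PySem.List.pyGetD pattern r []) c 0)) else st'.2.1,
          if c < (pattern.headI.length : Int) - co then
            pvSetCell st'.2.2.1 r c (some (PySem.List.pyGetD (PySem.List.pyGetD pattern r []) c 0)) else st'.2.2.1,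
          if co ≤ c then
            pvSetCell st'.2.2.2 r (c - co) (some (PySem.List.pyGetD (PySem.List.pyGetD pattern r []) c 0)) else st'.2.2.2 )
        = st' := by
      intro st' c hc
      have hcm := PySem.List.mem_pyRange_one.mp hc
      rw [if_neg (by omega), if_neg (by omega), if_neg (by omega), if_neg (by omega)]
    exact Eq.trans (PySem.List.foldl_congr_mem _ _ _ _ hstep) (PySem.List.foldl_ignore _ _)
  refine Eq.trans (Eq.trans (PySem.List.foldl_congr_mem _ _ _ _ hid) (PySem.List.foldl_ignore _ _)) ?_
  have hnilT : PySem.List.pyRange 0 ((pattern.length : Int) - ro) = ([] : List Int) :=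
    PySem.List.pyRange_one_eq_nil (by omega)
  have hnilW : PySem.List.pyRange 0 ((pattern.headI.length : Int) - co) = ([] : List Int) :=
    PySem.List.pyRange_one_eq_nil (by omega)
  have hmax : max 0 ((pattern.length : Int) - ro) = 0 := by omega
  have hmaxW : max 0 ((pattern.headI.length : Int) - co) = 0 := by omega
  refine Prod.ext ?_ (Prod.ext ?_ (Prod.ext ?_ ?_))
  · rw [hnilT, hmax, PySem.List.slice_to _ le_rfl]
    simp
  · rw [hnilT, PySem.List.slice_toNat _ hro (by positivity)]
    simp
    omega
  · rw [hnilW]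
    apply List.ext_getElem
    · simp [PySem.List.length_pyRange_one]
    intro j h1 h2
    simp only [List.getElem_map, hmaxW, PySem.List.slice_to _ le_rfl]
    simp
  · rw [hnilW]
    apply List.ext_getElem
    · simp [PySem.List.length_pyRange_one]
    intro j h1 h2
    simp only [List.getElem_map, PySem.List.slice_toNat _ hco (by positivity : (0:Int) ≤ (pattern.headI.length : Int))]
    simp
    omega

-- beta-normal restatements of pvIdxGetD for the four slice projections
lemma pvIdxGetD1 (l : List (List Int × (List (List Int) × List (List Int) × List (List Int) × List (List Int))))
    (c : List (List Int)) :
    (l.foldl (fun d q => d.modify q.2.1 [] (fun x => x ++ [q.1])) PySem.Dict.empty).getD c []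
    = (l.filter (fun q => q.2.1 == c)).map (fun q => q.1) :=
  pvIdxGetD l (fun q => q.2.1) (fun q => q.1) c
lemma pvIdxGetD2 (l : List (List Int × (List (List Int) × List (List Int) × List (List Int) × List (List Int))))
    (c : List (List Int)) :
    (l.foldl (fun d q => d.modify q.2.2.1 [] (fun x => x ++ [q.1])) PySem.Dict.empty).getD c []
    = (l.filter (fun q => q.2.2.1 == c)).map (fun q => q.1) :=
  pvIdxGetD l (fun q => q.2.2.1) (fun q => q.1) c
lemma pvIdxGetD3 (l : List (List Int × (List (List Int) × List (List Int) × List (List Int) × List (List Int))))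
    (c : List (List Int)) :
    (l.foldl (fun d q => d.modify q.2.2.2.1 [] (fun x => x ++ [q.1])) PySem.Dict.empty).getD c []
    = (l.filter (fun q => q.2.2.2.1 == c)).map (fun q => q.1) :=
  pvIdxGetD l (fun q => q.2.2.2.1) (fun q => q.1) c
lemma pvIdxGetD4 (l : List (List Int × (List (List Int) × List (List Int) × List (List Int) × List (List Int))))
    (c : List (List Int)) :
    (l.foldl (fun d q => d.modify q.2.2.2.2 [] (fun x => x ++ [q.1])) PySem.Dict.empty).getD c []
    = (l.filter (fun q => q.2.2.2.2 == c)).map (fun q => q.1) :=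
  pvIdxGetD l (fun q => q.2.2.2.2) (fun q => q.1) c

-- ===== VERDICT (by name: the statement is the Claim_ definition above) =====
theorem compute_adjacencies_spec : Claim_equal_compute_adjacencies := by
  intro ps ro co _ hpre
  obtain ⟨hro, hco, hp⟩ := hpre
  unfold Spec_compute_adjacencies
  simp only [compute_adjacencies, compute_adjacencies_alt]
  refine congrArg (fun d : PySem.Dict (List Int) (PySem.Dict String (List (List Int))) =>
    d.items.map (fun p => (p.1, p.2.items))) ?_
  -- A side: collapse each pattern's inner double loop into a single insert
  have hA : ∀ (d : PySem.Dict (List Int) (PySem.Dict String (List (List Int)))),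
      ∀ p1 ∈ ps,
      ps.foldl (fun d p2 =>
        (compute_adjacency_for_pattern_pair p1 p2 ro co).foldl (fun d s =>
          d.modify (pattern_to_tuple p1) PySem.Dict.empty
            (fun inner => inner.modify s [] (fun l => l ++ [pattern_to_tuple p2]))) d)
        (d.insert (pattern_to_tuple p1)
          (PySem.Dict.ofList [("above", ([] : List (List Int))), ("below", []),
                              ("left", []), ("right", [])]))
      = d.insert (pattern_to_tuple p1) (pvMk4
          ((ps.filter (fun p2 => decide ((get_pattern_slices p1 ro co).1
            = (get_pattern_slices p2 ro co).2.1))).map pattern_to_tuple)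
          ((ps.filter (fun p2 => decide ((get_pattern_slices p1 ro co).2.1
            = (get_pattern_slices p2 ro co).1))).map pattern_to_tuple)
          ((ps.filter (fun p2 => decide ((get_pattern_slices p1 ro co).2.2.1
            = (get_pattern_slices p2 ro co).2.2.2))).map pattern_to_tuple)
          ((ps.filter (fun p2 => decide ((get_pattern_slices p1 ro co).2.2.2
            = (get_pattern_slices p2 ro co).2.2.1))).map pattern_to_tuple)) := by
    intro d p1 _
    rw [pvOfList4]
    refine Eq.trans (pvFoldFoldModifyInsert ps
      (fun p2 => compute_adjacency_for_pattern_pair p1 p2 ro co) d (pattern_to_tuple p1)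
      PySem.Dict.empty
      (fun p2 s inner => inner.modify s [] (fun l => l ++ [pattern_to_tuple p2]))
      (pvMk4 [] [] [] [])) ?_
    refine congrArg (d.insert (pattern_to_tuple p1)) ?_
    simp only [compute_adjacency_for_pattern_pair]
    refine Eq.trans (pvEntryFold ps
      (fun p2 => (get_pattern_slices p1 ro co).2.1 = (get_pattern_slices p2 ro co).1)
      (fun p2 => (get_pattern_slices p1 ro co).1 = (get_pattern_slices p2 ro co).2.1)
      (fun p2 => (get_pattern_slices p1 ro co).2.2.2 = (get_pattern_slices p2 ro co).2.2.1)
      (fun p2 => (get_pattern_slices p1 ro co).2.2.1 = (get_pattern_slices p2 ro co).2.2.2)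
      pattern_to_tuple [] [] [] []) ?_
    simp only [List.nil_append]
  refine Eq.trans (PySem.List.foldl_congr_mem _ _ _ _ hA) ?_
  -- B side: split the index tuple and express each lookup as a filtered scan
  have hidx : (ps.map (fun p => (p.flatMap (fun row => row), pvSlices p ro co))).foldl
      (fun (st : PySem.Dict (List (List Int)) (List (List Int)) ×
                 PySem.Dict (List (List Int)) (List (List Int)) ×
                 PySem.Dict (List (List Int)) (List (List Int)) ×
                 PySem.Dict (List (List Int)) (List (List Int))) q =>
        ( st.1.modify q.2.1 [] (fun l => l ++ [q.1]),
          st.2.1.modify q.2.2.1 [] (fun l => l ++ [q.1]),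
          st.2.2.1.modify q.2.2.2.1 [] (fun l => l ++ [q.1]),
          st.2.2.2.modify q.2.2.2.2 [] (fun l => l ++ [q.1]) ))
      (PySem.Dict.empty, PySem.Dict.empty, PySem.Dict.empty, PySem.Dict.empty)
      = ( (ps.map (fun p => (p.flatMap (fun row => row), pvSlices p ro co))).foldl
            (fun d q => d.modify q.2.1 [] (fun l => l ++ [q.1])) PySem.Dict.empty,
          (ps.map (fun p => (p.flatMap (fun row => row), pvSlices p ro co))).foldl
            (fun d q => d.modify q.2.2.1 [] (fun l => l ++ [q.1])) PySem.Dict.empty,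
          (ps.map (fun p => (p.flatMap (fun row => row), pvSlices p ro co))).foldl
            (fun d q => d.modify q.2.2.2.1 [] (fun l => l ++ [q.1])) PySem.Dict.empty,
          (ps.map (fun p => (p.flatMap (fun row => row), pvSlices p ro co))).foldl
            (fun d q => d.modify q.2.2.2.2 [] (fun l => l ++ [q.1])) PySem.Dict.empty ) :=
    pvFoldSplit4 _
      (fun (d : PySem.Dict (List (List Int)) (List (List Int))) (q : List Int × (List (List Int) × List (List Int) × List (List Int) × List (List Int))) => d.modify q.2.1 [] (fun l => l ++ [q.1]))
      (fun (d : PySem.Dict (List (List Int)) (List (List Int))) (q : List Int × (List (List Int) × List (List Int) × List (List Int) × List (List Int))) => d.modify q.2.2.1 [] (fun l => l ++ [q.1]))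
      (fun (d : PySem.Dict (List (List Int)) (List (List Int))) (q : List Int × (List (List Int) × List (List Int) × List (List Int) × List (List Int))) => d.modify q.2.2.2.1 [] (fun l => l ++ [q.1]))
      (fun (d : PySem.Dict (List (List Int)) (List (List Int))) (q : List Int × (List (List Int) × List (List Int) × List (List Int) × List (List Int))) => d.modify q.2.2.2.2 [] (fun l => l ++ [q.1])) _
  rw [hidx, List.foldl_map]
  -- compare the two insert loops pattern by pattern
  refine PySem.List.foldl_congr_mem _ _ _ _ ?_
  intro d p1 hp1
  rw [pvOfList4, pvIdxGetD1, pvIdxGetD2, pvIdxGetD3, pvIdxGetD4]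
  simp only [List.filter_map, List.map_map, Function.comp]
  have hbe : ∀ (x y : List (List Int)), (y == x) = decide (x = y) := by
    intro x y
    by_cases h : x = y
    · subst h
      simp
    · rw [decide_eq_false h, beq_eq_false_iff_ne]
      exact fun e => h e.symm
  have hslice : ∀ p ∈ ps, get_pattern_slices p ro co =
      ((pvSlices p ro co).1.map (fun row => row.map some),
       (pvSlices p ro co).2.1.map (fun row => row.map some),
       (pvSlices p ro co).2.2.1.map (fun row => row.map some),
       (pvSlices p ro co).2.2.2.map (fun row => row.map some)) := by
    intro p hpm
    rcases (hp p hpm).2 with hcase | hcase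
    · exact pvSlicesSpec p ro co hro hco (hp p hpm).1 hcase
    · exact pvSlicesDeg p ro co hro hco (hp p hpm).1 hcase.1 hcase.2
  have h1 := hslice p1 hp1
  have hkey : p1.flatMap (fun row => row) = pattern_to_tuple p1 := rfl
  rw [hkey]
  refine congrArg (d.insert (pattern_to_tuple p1)) ?_
  have hmap : ∀ (pr : List (List Int) → Bool),
      List.map ((fun (q : List Int × (List (List Int) × List (List Int) × List (List Int) × List (List Int))) => q.1) ∘ fun p => (p.flatMap (fun row => row), pvSlices p ro co))
        (List.filter pr ps)
      = List.map pattern_to_tuple (List.filter pr ps) :=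
    fun pr => List.map_congr_left (fun x _ => rfl)
  simp only [hmap]
  have hc1 : ∀ p2 ∈ ps,
      (decide ((get_pattern_slices p1 ro co).1 = (get_pattern_slices p2 ro co).2.1))
      = (((fun (q : List Int × (List (List Int) × List (List Int) × List (List Int) × List (List Int))) => q.2.2.1 == (pvSlices p1 ro co).1) ∘
          fun p => (p.flatMap (fun row => row), pvSlices p ro co)) p2) := by
    intro p2 hp2
    have h2 := hslice p2 hp2
    simp only [Function.comp_apply, h1, h2]
    rw [hbe]
    exact decide_eq_decide.mpr (pvCondIff _ _)
  have hc2 : ∀ p2 ∈ ps,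
      (decide ((get_pattern_slices p1 ro co).2.1 = (get_pattern_slices p2 ro co).1))
      = (((fun (q : List Int × (List (List Int) × List (List Int) × List (List Int) × List (List Int))) => q.2.1 == (pvSlices p1 ro co).2.1) ∘
          fun p => (p.flatMap (fun row => row), pvSlices p ro co)) p2) := by
    intro p2 hp2
    have h2 := hslice p2 hp2
    simp only [Function.comp_apply, h1, h2]
    rw [hbe]
    exact decide_eq_decide.mpr (pvCondIff _ _)
  have hc3 : ∀ p2 ∈ ps,
      (decide ((get_pattern_slices p1 ro co).2.2.1 = (get_pattern_slices p2 ro co).2.2.2))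
      = (((fun (q : List Int × (List (List Int) × List (List Int) × List (List Int) × List (List Int))) => q.2.2.2.2 == (pvSlices p1 ro co).2.2.1) ∘
          fun p => (p.flatMap (fun row => row), pvSlices p ro co)) p2) := by
    intro p2 hp2
    have h2 := hslice p2 hp2
    simp only [Function.comp_apply, h1, h2]
    rw [hbe]
    exact decide_eq_decide.mpr (pvCondIff _ _)
  have hc4 : ∀ p2 ∈ ps,
      (decide ((get_pattern_slices p1 ro co).2.2.2 = (get_pattern_slices p2 ro co).2.2.1))
      = (((fun (q : List Int × (List (List Int) × List (List Int) × List (List Int) × List (List Int))) => q.2.2.2.1 == (pvSlices p1 ro co).2.2.2) ∘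
          fun p => (p.flatMap (fun row => row), pvSlices p ro co)) p2) := by
    intro p2 hp2
    have h2 := hslice p2 hp2
    simp only [Function.comp_apply, h1, h2]
    rw [hbe]
    exact decide_eq_decide.mpr (pvCondIff _ _)
  rw [List.filter_congr hc1, List.filter_congr hc2, List.filter_congr hc3,
    List.filter_congr hc4]
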